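-- pv_equiv track=rewrite | github.com/mwiesbau/CS483-Project | generator.py | generate_grey_code
-- ===== SOURCE A (Python) =====
-- def generate_grey_code(fields=4, start=1, end=3):
--     '''
--
--     :param fields: length of the record
--     :param start: smallest integer
--     :param end: largest integer
--     :return: array in gray code order
--     '''
--
--     data = []
--     starting_record=[]
--
--     # CREATE FIRST RECORD
--     for i in range(0, fields):
--         starting_record.append(start)
--
--     # ADD FIRST RECORD TO ARRAY
--     for j in range(start, end+1, 1):
--         record = starting_record[:-1]
--         record.append(j)
--         data.append(record)
--
--     # MOVING FROM SECOND TO LAST FIELD POSITION FORWARD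
--     for position in range(fields-2, -1, -1):
--         # mirror n times with iterating
--         temp_data = []
--         counter = 0
--
--         # GENERATE n FOLDS IN THE RANGE OF POSSIBLE INTEGER VALUES
--         for fold in range(start, end, 1):
--
--             # IS THE CURRENT FOLD IS EVEN DECREMENT THE VALUES
--             # AND ADD GENERATED RECORD TO TEMP ARRAY
--             if counter % 2 == 0:
--                 for k in range(len(data)-1, -1, -1):
--                     record = data[k].copy()
--                     record[position] = fold+1
--                     temp_data.append(record)
--
--             # IS THE CURRENT FOLD ODD INCREMENT THE VALUES
--             # AND ADD GENERATED RECORD TO TEMP ARRAY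
--             else:
--                 for k in range(0, len(data), 1):
--                     record = data[k].copy()
--                     record[position] = fold+1
--                     temp_data.append(record)
--
--             # INCREMENT COUNTER TO KEEP TRACK OF FOLDS
--             counter += 1
--         # WHEN THE CURRENT FOLD IS COMPLETE ADD THE GENERATED RECORDS TO THE DATA
--         data += temp_data
--
--
--     return data
-- ===== SOURCE B (Python) =====
-- def generate_grey_code(fields=4, start=1, end=3):
--     base = end - start + 1
--     if base <= 0:
--         return []
--     data = []
--     for i in range(base ** fields):
--         record = []
--         s = 0
--         pw = base ** (fields - 1)
--         for _ in range(fields):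
--             d = (i // pw) % base
--             e = d if s % 2 == 0 else base - 1 - d
--             s += e
--             record.append(start + e)
--             pw //= base
--         data.append(record)
--     return data
-- ===== Notes on version B (the rewrite author's own statement) =====
-- stated objective: simpler
-- what changed: A builds the Gray-code table by repeatedly mirroring and copying the growing data array position by position; B computes each record independently by decoding its row index into base-(end-start+1) digits and applying the reflected-Gray parity rule; Pre_ excludes negative field counts with start <= end, on which A degenerates to its fields==0 behaviour while B's base**fields becomes a float and range raises TypeError.
-- intended difference: For fields == 0 with start <= end, A returns one length-1 record [j] per value j (an artefact of its seed loop), while B returns the single empty record [[]], the correct Gray-code table over zero fields. — e.g. on generate_grey_code(0, 1, 2): A returns [[1], [2]], B returns [[]]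
-- outside the precondition, e.g. on generate_grey_code(-1, 1, 3): A returns [[1], [2], [3]], B raises TypeError
import Mathlib
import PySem

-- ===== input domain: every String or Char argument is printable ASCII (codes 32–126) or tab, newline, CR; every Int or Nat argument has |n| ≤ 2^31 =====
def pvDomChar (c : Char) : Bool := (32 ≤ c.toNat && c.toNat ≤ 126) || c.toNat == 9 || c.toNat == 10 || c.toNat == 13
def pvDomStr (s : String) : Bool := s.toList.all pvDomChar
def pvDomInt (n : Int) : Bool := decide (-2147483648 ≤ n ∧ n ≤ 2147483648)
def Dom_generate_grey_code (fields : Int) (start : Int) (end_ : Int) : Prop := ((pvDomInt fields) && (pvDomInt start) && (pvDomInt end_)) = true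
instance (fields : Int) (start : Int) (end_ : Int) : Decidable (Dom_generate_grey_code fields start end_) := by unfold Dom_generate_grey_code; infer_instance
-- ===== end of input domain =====

-- B replaces A's repeated mirror-and-copy construction of the reflected Gray sequence by a
-- direct per-index digit decode of each record (objective: simpler); Pre_ excludes negative
-- field counts (B raises there) and D_ states the intended difference at fields = 0.


-- ===== PORT A =====
-- Python lists are dynamic arrays: the growing lists are ported as Array with push = append;
-- every index k below comes from range(0,len) or range(len-1,-1,-1), so data[k] is Array.getD.
-- 'record = data[k].copy(); record[position] = fold+1' (a name for the loop body, same computation)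
def pvRowA (data : Array (List Int)) (position : Int) (v : Int) (k : Int) : List Int :=
  PySem.List.pySetD (data.getD k.toNat []) position v

-- body of the 'for fold in range(start, end, 1)' loop, state = (temp_data, counter)
def pvFoldA (data : Array (List Int)) (position : Int) (st : Array (List Int) × Int)
    (fold : Int) : Array (List Int) × Int :=
  if PySem.Int.mod st.2 2 = 0 then
    ((PySem.List.pyRange ((data.size : Int) - 1) (-1) (-1)).foldl
        (fun td k => td.push (pvRowA data position (fold + 1) k)) st.1, st.2 + 1)
  else
    ((PySem.List.pyRange 0 (data.size : Int) 1).foldl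
        (fun td k => td.push (pvRowA data position (fold + 1) k)) st.1, st.2 + 1)

-- body of the 'for position in range(fields-2, -1, -1)' loop
def pvStepA (start end_ : Int) (data : Array (List Int)) (position : Int) : Array (List Int) :=
  data ++ ((PySem.List.pyRange start end_ 1).foldl (pvFoldA data position) (#[], 0)).1

def generate_grey_code (fields : Int) (start : Int) (end_ : Int) : List (List Int) :=
  let starting_record : Array Int :=
    (PySem.List.pyRange 0 fields 1).foldl (fun sr _i => sr.push start) #[]
  let data : Array (List Int) :=
    (PySem.List.pyRange start (end_ + 1) 1).foldl
      (fun data j => data.push (PySem.List.slice starting_record.toList none (some (-1)) ++ [j])) #[]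
  ((PySem.List.pyRange (fields - 2) (-1) (-1)).foldl (pvStepA start end_) data).toList

-- ===== PORT B =====
-- body of Source B's digit loop 'for _ in range(fields)', state = (record, s, pw); i is fixed
def pvDigitB (base start i : Int) (st : Array Int × Int × Int) (_p : Int) : Array Int × Int × Int :=
  let d := PySem.Int.mod (PySem.Int.floordiv i st.2.2) base
  let e := if PySem.Int.mod st.2.1 2 = 0 then d else base - 1 - d
  (st.1.push (start + e), st.2.1 + e, PySem.Int.floordiv st.2.2 base)

def generate_grey_code_alt (fields : Int) (start : Int) (end_ : Int) : List (List Int) :=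
  let base := end_ - start + 1
  if base ≤ 0 then []
  else
    ((PySem.List.pyRange 0 (base ^ fields.toNat) 1).foldl
      (fun data i => data.push
        (((PySem.List.pyRange 0 fields 1).foldl (pvDigitB base start i)
            (#[], 0, base ^ (fields - 1).toNat)).1.toList)) #[]).toList

-- ===== PRECONDITION & SPEC =====
-- Pre_ excludes negative field counts with a nonempty value range, on which A still returns (it
-- degenerates to its fields==0 behaviour) but B's base**fields is a float and range() raises TypeError.
def Pre_generate_grey_code (fields : Int) (start : Int) (end_ : Int) : Prop := 0 ≤ fields ∨ end_ < start
instance (fields : Int) (start : Int) (end_ : Int) : Decidable (Pre_generate_grey_code fields start end_) := by unfold Pre_generate_grey_code; infer_instance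
def pvWitness_generate_grey_code : Int × Int × Int := (2, 1, 3)

-- For fields == 0 with start <= end, A returns one length-1 record [j] per value j (an artefact
-- of its seed loop), while B returns the single empty record [[]], the correct Gray-code table
-- over zero fields.
def D_generate_grey_code (fields : Int) (start : Int) (end_ : Int) : Prop := fields = 0 ∧ start ≤ end_
instance (fields : Int) (start : Int) (end_ : Int) : Decidable (D_generate_grey_code fields start end_) := by unfold D_generate_grey_code; infer_instance

def Spec_generate_grey_code (fields : Int) (start : Int) (end_ : Int) (out : List (List Int)) : Prop := ¬ D_generate_grey_code fields start end_ → out = generate_grey_code_alt fields start end_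
instance (fields : Int) (start : Int) (end_ : Int) (out : List (List Int)) : Decidable (Spec_generate_grey_code fields start end_ out) := by unfold Spec_generate_grey_code; infer_instance

def pvDiffWitness_generate_grey_code : Int × Int × Int := (0, 1, 2)
def pvDiffWitnessOut_generate_grey_code : (List (List Int)) × (List (List Int)) := ([[1], [2]], [[]])

-- ===== CLAIM (what is proved, stated in full; the proofs are below) =====
def Claim_unchanged_generate_grey_code : Prop := ∀ (fields : Int) (start : Int) (end_ : Int), Dom_generate_grey_code fields start end_ → Pre_generate_grey_code fields start end_ → Spec_generate_grey_code fields start end_ (generate_grey_code fields start end_)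
def Claim_changed_generate_grey_code : Prop := Dom_generate_grey_code (pvDiffWitness_generate_grey_code.1) (pvDiffWitness_generate_grey_code.2.1) (pvDiffWitness_generate_grey_code.2.2) ∧ Pre_generate_grey_code (pvDiffWitness_generate_grey_code.1) (pvDiffWitness_generate_grey_code.2.1) (pvDiffWitness_generate_grey_code.2.2) ∧ D_generate_grey_code (pvDiffWitness_generate_grey_code.1) (pvDiffWitness_generate_grey_code.2.1) (pvDiffWitness_generate_grey_code.2.2) ∧ generate_grey_code (pvDiffWitness_generate_grey_code.1) (pvDiffWitness_generate_grey_code.2.1) (pvDiffWitness_generate_grey_code.2.2) = pvDiffWitnessOut_generate_grey_code.1 ∧ generate_grey_code_alt (pvDiffWitness_generate_grey_code.1) (pvDiffWitness_generate_grey_code.2.1) (pvDiffWitness_generate_grey_code.2.2) = pvDiffWitnessOut_generate_grey_code.2 ∧ pvDiffWitnessOut_generate_grey_code.1 ≠ pvDiffWitnessOut_generate_grey_code.2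
def Claim_exact_generate_grey_code : Prop := ∀ (fields : Int) (start : Int) (end_ : Int), Dom_generate_grey_code fields start end_ → Pre_generate_grey_code fields start end_ → D_generate_grey_code fields start end_ → generate_grey_code fields start end_ ≠ generate_grey_code_alt fields start end_

-- ===== LEMMAS AND PROOFS =====

-- list-level shadow of A's loops (proof layer; the ports above are the Array transcriptions)
def pvRowAL (data : List (List Int)) (position : Int) (v : Int) (k : Int) : List Int :=
  PySem.List.pySetD (PySem.List.pyGetD data k []) position v

def pvFoldAL (data : List (List Int)) (position : Int) (st : List (List Int) × Int)
    (fold : Int) : List (List Int) × Int :=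
  if PySem.Int.mod st.2 2 = 0 then
    ((PySem.List.pyRange (PySem.List.len data - 1) (-1) (-1)).foldl
        (fun td k => td ++ [pvRowAL data position (fold + 1) k]) st.1, st.2 + 1)
  else
    ((PySem.List.pyRange 0 (PySem.List.len data) 1).foldl
        (fun td k => td ++ [pvRowAL data position (fold + 1) k]) st.1, st.2 + 1)

def pvStepAL (start end_ : Int) (data : List (List Int)) (position : Int) : List (List Int) :=
  data ++ ((PySem.List.pyRange start end_ 1).foldl (pvFoldAL data position) ([], 0)).1

-- Array ↔ List bridges
theorem pvPushFold {ι α : Type} (f : ι → α) (l : List ι) (a : Array α) :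
    (l.foldl (fun acc x => acc.push (f x)) a).toList = a.toList ++ l.map f := by
  induction l generalizing a with
  | nil => simp
  | cons x xs ih => rw [List.foldl_cons, ih, List.map_cons]; simp

theorem pvFoldlPair {ι γ : Type} (F : Array γ × Int → ι → Array γ × Int)
    (G : List γ × Int → ι → List γ × Int)
    (h : ∀ s x, ((F s x).1.toList, (F s x).2) = G (s.1.toList, s.2) x)
    (l : List ι) (s : Array γ × Int) :
    ((l.foldl F s).1.toList, (l.foldl F s).2) = l.foldl G (s.1.toList, s.2) := by
  induction l generalizing s with
  | nil => rfl
  | cons x xs ih => rw [List.foldl_cons, List.foldl_cons, ← h, ih]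

theorem pvFoldlArr {ι γ : Type} (F : Array γ → ι → Array γ) (G : List γ → ι → List γ)
    (h : ∀ a x, (F a x).toList = G a.toList x) (l : List ι) (a : Array γ) :
    (l.foldl F a).toList = l.foldl G a.toList := by
  induction l generalizing a with
  | nil => rfl
  | cons x xs ih => rw [List.foldl_cons, List.foldl_cons, ← h, ih]

theorem pvArrGetD {α : Type} (a : Array α) (n : Nat) (d : α) :
    a.getD n d = a.toList.getD n d := by
  unfold Array.getD
  by_cases h : n < a.size
  · rw [dif_pos h, List.getD_eq_getElem?_getD, List.getElem?_eq_getElem (by simpa using h)]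
    simp
  · rw [dif_neg h, List.getD_eq_getElem?_getD, List.getElem?_eq_none (by simpa using h)]
    rfl

theorem pvRowA_bridge (data : Array (List Int)) (p v k : Int) (hk : 0 ≤ k) :
    pvRowA data p v k = pvRowAL data.toList p v k := by
  unfold pvRowA pvRowAL
  rw [show k = ((k.toNat : Nat) : Int) by omega, PySem.List.pyGetD_natCast, Int.toNat_natCast,
      pvArrGetD]

theorem pvFoldA_bridge (data : Array (List Int)) (p : Int) (s : Array (List Int) × Int)
    (x : Int) :
    ((pvFoldA data p s x).1.toList, (pvFoldA data p s x).2)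
      = pvFoldAL data.toList p (s.1.toList, s.2) x := by
  have hlen : PySem.List.len data.toList = (data.size : Int) := by
    rw [PySem.List.len_eq, Array.length_toList]
  unfold pvFoldA pvFoldAL
  split_ifs with hc
  · refine congrArg (fun z => (z, s.2 + 1)) ?_
    rw [hlen, pvPushFold (fun k => pvRowA data p (x + 1) k),
        PySem.List.foldl_append_singleton_eq_map]
    congr 1
    apply List.map_congr_left
    intro k hk
    rw [PySem.List.mem_pyRange_neg_one] at hk
    exact pvRowA_bridge data p (x + 1) k (by omega)
  · refine congrArg (fun z => (z, s.2 + 1)) ?_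
    rw [hlen, pvPushFold (fun k => pvRowA data p (x + 1) k),
        PySem.List.foldl_append_singleton_eq_map]
    congr 1
    apply List.map_congr_left
    intro k hk
    rw [PySem.List.mem_pyRange_one] at hk
    exact pvRowA_bridge data p (x + 1) k (by omega)

theorem pvStepA_bridge (start end_ : Int) (data : Array (List Int)) (pos : Int) :
    (pvStepA start end_ data pos).toList = pvStepAL start end_ data.toList pos := by
  unfold pvStepA pvStepAL
  rw [Array.toList_append]
  congr 1
  have h := pvFoldlPair (pvFoldA data pos) (pvFoldAL data.toList pos)
      (fun s x => pvFoldA_bridge data pos s x) (PySem.List.pyRange start end_ 1) (#[], 0)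
  exact congrArg Prod.fst h

-- the Array port of A, written as the list-level position fold
theorem pvPortA_eq (fields start end_ : Int) :
    generate_grey_code fields start end_
      = (PySem.List.pyRange (fields - 2) (-1) (-1)).foldl (pvStepAL start end_)
          ((PySem.List.pyRange start (end_ + 1) 1).map
            (fun j => List.replicate (fields.toNat - 1) start ++ [j])) := by
  unfold generate_grey_code
  rw [pvFoldlArr (pvStepA start end_) (pvStepAL start end_)
      (fun a x => pvStepA_bridge start end_ a x)]
  congr 1
  rw [pvPushFold (fun j => PySem.List.slice
        ((PySem.List.pyRange 0 fields 1).foldl (fun sr _i => sr.push start) #[]).toList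
        none (some (-1)) ++ [j]), List.nil_append]
  have hsr : ((PySem.List.pyRange 0 fields 1).foldl
        (fun sr _i => sr.push start) (#[] : Array Int)).toList
      = List.replicate fields.toNat start := by
    rw [pvPushFold (fun _ => start), List.nil_append, List.map_const',
        PySem.List.length_pyRange_one]
    norm_num
  apply List.map_congr_left
  intro j _
  rw [hsr, PySem.List.slice_to_neg_one, List.dropLast_replicate]


-- the Gray record of index i with k digits left, parity accumulator s (Nat-fuel view of B's digit loop)
def pvGray (b st : Int) : Nat → Int → Int → List Int
  | 0, _, _ => []
  | k+1, s, i =>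
      let d := PySem.Int.mod (PySem.Int.floordiv i (b ^ k)) b
      let e := if PySem.Int.mod s 2 = 0 then d else b - 1 - d
      (st + e) :: pvGray b st k (s + e) i

-- A's data array after the last k field positions have been filled (n = fields)
def pvD (b st : Int) (n k : Nat) : List (List Int) :=
  (List.range (b.toNat ^ k)).map
    (fun (i : Nat) => List.replicate (n - k) st ++ pvGray b st k 0 (i : Int))

-- the records one pass of A's 'fold' loop appends for digit m (m ≥ 1; even m keeps the
-- order of data, odd m mirrors it)
def pvBlock (start : Int) (data : List (List Int)) (p : Int) (m : Int) : List (List Int) :=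
  (if m % 2 = 1 then data.reverse else data).map
    (fun rec => PySem.List.pySetD rec p (start + m))

theorem pvGray_parity (b st : Int) (k : Nat) (s s' i : Int) (h : s % 2 = s' % 2) :
    pvGray b st k s i = pvGray b st k s' i := by
  induction k generalizing s s' i with
  | zero => rfl
  | succ k ih =>
      have hm : PySem.Int.mod s 2 = s % 2 := PySem.Int.mod_eq_emod_of_pos (by omega)
      have hm' : PySem.Int.mod s' 2 = s' % 2 := PySem.Int.mod_eq_emod_of_pos (by omega)
      simp only [pvGray, hm, hm', h]
      exact congrArg _ (ih _ _ _ (by omega))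

-- the digits of i with k positions only depend on i modulo b^k
theorem pvGray_period (b st : Int) (hb : 1 ≤ b) (k : Nat) (s i t : Int) :
    pvGray b st k s (i + t * b ^ k) = pvGray b st k s i := by
  induction k generalizing s t with
  | zero => rfl
  | succ k ih =>
      have hbk : (0:Int) < b ^ k := pow_pos (by omega) k
      have hdiv : PySem.Int.floordiv (i + t * b ^ (k+1)) (b ^ k)
          = PySem.Int.floordiv i (b ^ k) + t * b := by
        rw [PySem.Int.floordiv_eq_ediv_of_pos hbk, PySem.Int.floordiv_eq_ediv_of_pos hbk]
        rw [show i + t * b ^ (k+1) = i + (t * b) * b ^ k by ring]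
        rw [Int.add_mul_ediv_right _ _ (by omega)]
      have hmodb : PySem.Int.mod (PySem.Int.floordiv i (b ^ k) + t * b) b
          = PySem.Int.mod (PySem.Int.floordiv i (b ^ k)) b := by
        rw [PySem.Int.mod_eq_emod_of_pos (by omega), PySem.Int.mod_eq_emod_of_pos (by omega),
            show PySem.Int.floordiv i (b ^ k) + t * b
              = PySem.Int.floordiv i (b ^ k) + b * t by ring]
        exact Int.add_mul_emod_self_left _ _ _
      simp only [pvGray, hdiv, hmodb]
      rw [show i + t * b ^ (k+1) = i + (t * b) * b ^ k by ring, ih]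

theorem pvGray_split (b st : Int) (hb : 1 ≤ b) (k : Nat) (s m r : Int)
    (hm0 : 0 ≤ m) (hm : m < b) (hr0 : 0 ≤ r) (hr : r < b ^ k) :
    pvGray b st (k+1) s (m * b ^ k + r) =
      (st + (if PySem.Int.mod s 2 = 0 then m else b - 1 - m)) ::
        pvGray b st k (s + (if PySem.Int.mod s 2 = 0 then m else b - 1 - m)) r := by
  have hbk : (0:Int) < b ^ k := pow_pos (by omega) k
  have hdiv : PySem.Int.floordiv (m * b ^ k + r) (b ^ k) = m := by
    rw [PySem.Int.floordiv_eq_iff_of_pos hbk]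
    constructor <;> nlinarith
  have hmb : PySem.Int.mod m b = m := by
    rw [PySem.Int.mod_eq_emod_of_pos (by omega)]
    exact Int.emod_eq_of_lt hm0 hm
  simp only [pvGray, hdiv, hmb]
  rw [show m * b ^ k + r = r + m * b ^ k by ring, pvGray_period b st hb k _ r m]

theorem pvGray_reflect (b st : Int) (hb : 1 ≤ b) (k : Nat) (s i : Int)
    (h0 : 0 ≤ i) (h1 : i < b ^ k) :
    pvGray b st k (s + 1) i = pvGray b st k s (b ^ k - 1 - i) := by
  induction k generalizing s i with
  | zero => rfl
  | succ k ih =>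
      have hbk : (0:Int) < b ^ k := pow_pos (by omega) k
      set m := i / b ^ k with hmdef
      set r := i % b ^ k with hrdef
      have hi : i = m * b ^ k + r := by
        rw [hmdef, hrdef]; rw [mul_comm]; exact (Int.ediv_add_emod i (b ^ k)).symm
      have hm0 : 0 ≤ m := Int.ediv_nonneg h0 (le_of_lt hbk)
      have hr0 : 0 ≤ r := Int.emod_nonneg i (by omega)
      have hrlt : r < b ^ k := Int.emod_lt_of_pos i hbk
      have hmlt : m < b := by
        by_contra hc
        have hc' : b ≤ m := le_of_not_gt hc
        have h2 : b * b ^ k ≤ m * b ^ k := by nlinarith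
        have h3 : i < m * b ^ k := by
          calc i < b ^ (k+1) := h1
          _ = b * b ^ k := by ring
          _ ≤ m * b ^ k := h2
        omega
      rw [hi]
      have hi' : b ^ (k+1) - 1 - (m * b ^ k + r) = (b - 1 - m) * b ^ k + (b ^ k - 1 - r) := by
        ring
      rw [hi']
      rw [pvGray_split b st hb k (s+1) m r hm0 hmlt hr0 hrlt]
      rw [pvGray_split b st hb k s (b-1-m) (b^k-1-r) (by omega) (by omega) (by omega) (by omega)]
      have hms : PySem.Int.mod s 2 = s % 2 := PySem.Int.mod_eq_emod_of_pos (by omega)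
      have hms1 : PySem.Int.mod (s+1) 2 = (s+1) % 2 := PySem.Int.mod_eq_emod_of_pos (by omega)
      by_cases hp : s % 2 = 0
      · have hp1 : ¬ ((s+1) % 2 = 0) := by omega
        rw [hms, hms1, if_neg hp1, if_pos hp]
        have htail := ih (s + (b - 1 - m)) r hr0 hrlt
        rw [show s + 1 + (b - 1 - m) = s + (b - 1 - m) + 1 by ring, htail]
      · have hp1 : (s+1) % 2 = 0 := by omega
        rw [hms, hms1, if_pos hp1, if_neg hp]
        have heq : b - 1 - (b - 1 - m) = m := by ring
        rw [heq]
        have htail := ih (s + m) r hr0 hrlt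
        rw [show s + 1 + m = s + m + 1 by ring, htail]

-- the copy loops of A, expressed as a map over data
theorem pvMapRows (data : List (List Int)) (p v : Int) :
    List.map (pvRowAL data p v) (PySem.List.pyRange 0 (PySem.List.len data) 1)
      = data.map (fun rec => PySem.List.pySetD rec p v) := by
  have h : List.map (pvRowAL data p v) (PySem.List.pyRange 0 (PySem.List.len data) 1)
      = List.map ((fun rec => PySem.List.pySetD rec p v)
          ∘ (fun k => PySem.List.pyGetD data k [])) (PySem.List.pyRange 0 (PySem.List.len data) 1) := rfl
  rw [h, ← List.map_map, PySem.List.map_pyGetD_pyRange_zero]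

theorem pvRowLoop_rev (data : List (List Int)) (p v : Int) (acc : List (List Int)) :
    (PySem.List.pyRange (PySem.List.len data - 1) (-1) (-1)).foldl
      (fun td k => td ++ [pvRowAL data p v k]) acc
      = acc ++ (data.map (fun rec => PySem.List.pySetD rec p v)).reverse := by
  rw [PySem.List.len_eq, PySem.List.pyRange_neg_one_eq_reverse,
      show ((-1:Int)+1) = 0 by ring, PySem.List.foldl_append_singleton_eq_map,
      List.map_reverse]
  rw [show ((data.length : Int) - 1 + 1) = PySem.List.len data by rw [PySem.List.len_eq]; ring]
  rw [pvMapRows]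

theorem pvRowLoop_fwd (data : List (List Int)) (p v : Int) (acc : List (List Int)) :
    (PySem.List.pyRange 0 (PySem.List.len data) 1).foldl
      (fun td k => td ++ [pvRowAL data p v k]) acc
      = acc ++ data.map (fun rec => PySem.List.pySetD rec p v) := by
  rw [PySem.List.foldl_append_singleton_eq_map, pvMapRows]

-- the blocks for digits c+1, …, c+t in order
def pvBlocks (start : Int) (data : List (List Int)) (p c : Int) (t : Nat) : List (List Int) :=
  (List.range t).flatMap (fun (j : Nat) => pvBlock start data p (c + 1 + (j : Int)))

theorem pvBlocks_succ (start : Int) (data : List (List Int)) (p c : Int) (t : Nat) :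
    pvBlocks start data p c (t+1)
      = pvBlock start data p (c + 1) ++ pvBlocks start data p (c + 1) t := by
  unfold pvBlocks
  rw [List.range_succ_eq_map, List.flatMap_cons]
  congr 1
  · norm_num
  · rw [List.flatMap_map]
    apply List.flatMap_congr
    intro j _
    have : c + 1 + (Nat.succ j : Int) = c + 1 + 1 + (j : Int) := by push_cast; ring
    show pvBlock start data p (c + 1 + (Nat.succ j : Int)) = _
    rw [this]

-- A's 'fold' loop: from counter c it appends the blocks for digits c+1, …, c+t
theorem pvFoldAL_loop (start end_ : Int) (data : List (List Int)) (p : Int)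
    (t : Nat) (c : Int) (acc : List (List Int)) (hc : 0 ≤ c)
    (hend : start + c + t = end_) :
    (PySem.List.pyRange (start + c) end_ 1).foldl (pvFoldAL data p) (acc, c) =
      (acc ++ pvBlocks start data p c t, c + t) := by
  induction t generalizing c acc with
  | zero =>
      rw [PySem.List.pyRange_one_eq_nil (by omega)]
      simp [pvBlocks]
  | succ t ih =>
      have hlt : start + c < end_ := by push_cast at hend ⊢; omega
      rw [PySem.List.pyRange_one_cons hlt, List.foldl_cons]
      have hcm : PySem.Int.mod c 2 = c % 2 := PySem.Int.mod_eq_emod_of_pos (by omega)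
      have hstep : pvFoldAL data p (acc, c) (start + c)
          = (acc ++ pvBlock start data p (c + 1), c + 1) := by
        unfold pvFoldAL
        by_cases hcpar : c % 2 = 0
        · rw [if_pos (by simpa [hcm] using hcpar)]
          simp only [pvRowLoop_rev]
          unfold pvBlock
          rw [if_pos (by omega), List.map_reverse]
          have : start + c + 1 = start + (c + 1) := by ring
          rw [this]
        · rw [if_neg (by simpa [hcm] using hcpar)]
          simp only [pvRowLoop_fwd]
          unfold pvBlock
          rw [if_neg (by omega)]
          have : start + c + 1 = start + (c + 1) := by ring
          rw [this]
      rw [hstep]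
      rw [show PySem.List.pyRange (start + c + 1) end_ 1
            = PySem.List.pyRange (start + (c+1)) end_ 1 by ring_nf]
      rw [ih (c+1) (acc ++ pvBlock start data p (c + 1)) (by omega) (by push_cast at hend ⊢; omega)]
      rw [pvBlocks_succ]
      simp only [Prod.mk.injEq, List.append_assoc]
      exact ⟨trivial, by push_cast; ring⟩

theorem pvSet_prefix (xs : List Int) (y v : Int) (zs : List Int) :
    (xs ++ y :: zs).set xs.length v = xs ++ v :: zs := by
  induction xs with
  | nil => rfl
  | cons x xs ih => simp [ih]

theorem pvRange_mul_flatMap (M N : Nat) :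
    List.range (M * N)
      = (List.range M).flatMap (fun m => (List.range N).map (fun r => m * N + r)) := by
  induction M with
  | zero => simp
  | succ M ih =>
      rw [show (M+1) * N = M * N + N by ring, List.range_add, ih, List.range_succ,
          List.flatMap_append, List.flatMap_singleton]

theorem pvMapRevRange (N : Nat) (h : Nat → List Int) :
    (List.range N).map (fun r => h (N-1-r)) = ((List.range N).map h).reverse := by
  rw [← List.map_reverse, List.range_eq_range', List.reverse_range']
  simp [← List.range_eq_range', Function.comp]

-- one block of rows, written as the set-image of the previous data array
theorem pvSet_replicate (j : Nat) (a v : Int) (zs : List Int) :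
    (List.replicate (j+1) a ++ zs).set j v = List.replicate j a ++ v :: zs := by
  rw [List.replicate_succ', List.append_assoc, List.singleton_append]
  have h := pvSet_prefix (List.replicate j a) a v zs
  simp only [List.length_replicate] at h
  exact h

theorem pvChunkCore (b start : Int) (n k : Nat) (hkn : k + 1 ≤ n) (v : Int) :
    (List.range (b.toNat ^ k)).map
        (fun (r : Nat) => List.replicate (n - k - 1) start ++ (start + v) :: pvGray b start k 0 (r : Int))
      = (pvD b start n k).map
          (fun rec => PySem.List.pySetD rec ((n - k - 1 : Nat) : Int) (start + v)) := by
  unfold pvD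
  rw [List.map_map]
  apply List.map_congr_left
  intro r _
  show _ = PySem.List.pySetD
      (List.replicate (n - k) start ++ pvGray b start k 0 (r : Int)) _ _
  rw [PySem.List.pySetD_natCast]
  rw [show n - k = (n - k - 1) + 1 by omega, Nat.add_sub_cancel, pvSet_replicate]

theorem pvBlock_zero (b start : Int) (n k : Nat) (hkn : k + 1 ≤ n) :
    pvBlock start (pvD b start n k) ((n - k - 1 : Nat) : Int) 0 = pvD b start n k := by
  unfold pvBlock
  rw [if_neg (by omega)]
  rw [← pvChunkCore b start n k hkn 0]
  unfold pvD
  apply List.map_congr_left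
  intro r _
  rw [show n - k = (n - k - 1) + 1 by omega, List.replicate_succ']
  simp

theorem pvChunk (b start : Int) (hb : 1 ≤ b) (n k : Nat) (hkn : k + 1 ≤ n)
    (m : Nat) (hm : m < b.toNat) :
    (List.range (b.toNat ^ k)).map
        (fun r => List.replicate (n - (k+1)) start
          ++ pvGray b start (k+1) 0 ((m * b.toNat ^ k + r : Nat) : Int))
      = pvBlock start (pvD b start n k) ((n - k - 1 : Nat) : Int) (m : Int) := by
  have hB : ((b.toNat : Nat) : Int) = b := Int.toNat_of_nonneg (by omega)
  have hNc : ((b.toNat ^ k : Nat) : Int) = b ^ k := by push_cast [hB]; ring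
  have hsplit : ∀ r : Nat, r < b.toNat ^ k →
      pvGray b start (k+1) 0 ((m * b.toNat ^ k + r : Nat) : Int)
        = (start + (m : Int)) :: pvGray b start k (m : Int) (r : Int) := by
    intro r hr
    have hcast : ((m * b.toNat ^ k + r : Nat) : Int) = (m : Int) * b ^ k + (r : Int) := by
      push_cast [hNc]; ring
    rw [hcast]
    rw [pvGray_split b start hb k 0 (m : Int) (r : Int) (by omega)
        (by omega) (by omega) (by omega)]
    rw [if_pos (by decide)]
    norm_num
  have hmain : (List.range (b.toNat ^ k)).map
      (fun r => List.replicate (n - (k+1)) start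
        ++ pvGray b start (k+1) 0 ((m * b.toNat ^ k + r : Nat) : Int))
      = (List.range (b.toNat ^ k)).map
        (fun (r : Nat) => List.replicate (n - k - 1) start
          ++ (start + (m : Int)) :: pvGray b start k (m : Int) (r : Int)) := by
    apply List.map_congr_left
    intro r hr
    rw [List.mem_range] at hr
    rw [hsplit r hr]
    rfl
  rw [hmain]
  by_cases hpar : m % 2 = 0
  · have hpe : ∀ r : Nat, pvGray b start k (m : Int) (r : Int)
        = pvGray b start k 0 (r : Int) := fun r =>
      pvGray_parity b start k (m : Int) 0 (r : Int) (by omega)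
    unfold pvBlock
    rw [if_neg (by omega)]
    rw [← pvChunkCore b start n k hkn (m : Int)]
    apply List.map_congr_left
    intro r _
    rw [hpe r]
  · have hpo : ∀ r : Nat, r < b.toNat ^ k →
        pvGray b start k (m : Int) (r : Int)
          = pvGray b start k 0 ((b.toNat ^ k - 1 - r : Nat) : Int) := by
      intro r hr
      have h1 : pvGray b start k (m : Int) (r : Int)
          = pvGray b start k (0 + 1) (r : Int) :=
        pvGray_parity b start k (m : Int) (0+1) (r : Int) (by omega)
      have hrc : ((r : Nat) : Int) < b ^ k := by omega
      have h2 := pvGray_reflect b start hb k 0 (r : Int) (by omega) hrc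
      have hcast : ((b.toNat ^ k - 1 - r : Nat) : Int) = b ^ k - 1 - (r : Int) := by omega
      rw [h1, h2, hcast]
    unfold pvBlock
    rw [if_pos (by omega), List.map_reverse]
    rw [← pvChunkCore b start n k hkn (m : Int), ← pvMapRevRange]
    apply List.map_congr_left
    intro r hr
    rw [List.mem_range] at hr
    rw [hpo r hr]

theorem pvStepAL_spec (start end_ : Int) (hb : 1 ≤ end_ - start + 1) (n k : Nat)
    (hkn : k + 1 ≤ n) :
    pvStepAL start end_ (pvD (end_-start+1) start n k) ((n - k - 1 : Nat) : Int)
      = pvD (end_-start+1) start n (k+1) := by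
  set b := end_ - start + 1 with hbdef
  set B := b.toNat with hBdef
  have hB : ((B : Nat) : Int) = b := Int.toNat_of_nonneg (by omega)
  set D := pvD b start n k with hDdef
  set p := ((n - k - 1 : Nat) : Int) with hpdef
  unfold pvStepAL
  rw [show PySem.List.pyRange start end_ 1 = PySem.List.pyRange (start + 0) end_ 1 by norm_num]
  rw [pvFoldAL_loop start end_ D p (B-1) 0 [] le_rfl (by omega)]
  show D ++ pvBlocks start D p 0 (B - 1) = _
  have hchunk : ∀ m ∈ List.range B,
      ((List.range (B^k)).map (fun r => m * B^k + r)).map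
          (fun (i : Nat) => List.replicate (n - (k+1)) start ++ pvGray b start (k+1) 0 (i : Int))
        = pvBlock start D p (m : Int) := by
    intro m hm
    rw [List.mem_range] at hm
    rw [List.map_map]
    exact pvChunk b start (by omega) n k hkn m hm
  have hrhs : pvD b start n (k+1)
      = (List.range B).flatMap (fun (m : Nat) => pvBlock start D p (m : Int)) := by
    show (List.range (B ^ (k+1))).map _ = _
    rw [show B ^ (k+1) = B * B ^ k by ring, pvRange_mul_flatMap B (B^k), List.map_flatMap]
    exact List.flatMap_congr hchunk
  rw [hrhs]
  have ht : B = (B - 1) + 1 := by omega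
  conv_rhs => rw [ht]
  rw [List.range_succ_eq_map, List.flatMap_cons, List.flatMap_map]
  congr 1
  · rw [show ((0 : Nat) : Int) = (0 : Int) by norm_num]
    exact (pvBlock_zero b start n k hkn).symm
  · unfold pvBlocks
    apply List.flatMap_congr
    intro j _
    show _ = pvBlock start D p ((Nat.succ j : Nat) : Int)
    rw [show ((Nat.succ j : Nat) : Int) = 0 + 1 + (j : Int) by push_cast; ring]

theorem pvPositions_fold (start end_ : Int) (hb : 1 ≤ end_ - start + 1) (n : Nat) (p : Nat)
    (hp : p + 2 ≤ n) :
    (PySem.List.pyRange (p : Int) (-1) (-1)).foldl (pvStepAL start end_)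
        (pvD (end_-start+1) start n (n - 1 - p))
      = pvD (end_-start+1) start n n := by
  induction p with
  | zero =>
      rw [show ((0:Nat):Int) = (0:Int) by norm_num]
      rw [PySem.List.pyRange_neg_one_cons (by norm_num),
          show (0:Int) - 1 = (-1:Int) by ring,
          PySem.List.pyRange_neg_one_eq_nil (by norm_num)]
      simp only [List.foldl_cons, List.foldl_nil]
      have h := pvStepAL_spec start end_ hb n (n-1-0) (by omega)
      rw [show ((n - (n-1-0) - 1 : Nat) : Int) = (0:Int) by omega] at h
      rw [h, show n-1-0+1 = n by omega]
  | succ p ih =>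
      rw [PySem.List.pyRange_neg_one_cons (by push_cast; omega),
          show ((Nat.succ p : Nat) : Int) - 1 = ((p : Nat) : Int) by push_cast; ring]
      simp only [List.foldl_cons]
      have harg : pvStepAL start end_ (pvD (end_-start+1) start n (n - 1 - (p+1)))
          ((Nat.succ p : Nat) : Int) = pvD (end_-start+1) start n (n - 1 - p) := by
        have h := pvStepAL_spec start end_ hb n (n - 1 - (p+1)) (by omega)
        rw [show ((n - (n - 1 - (p+1)) - 1 : Nat) : Int) = ((Nat.succ p : Nat) : Int) by omega] at h
        rw [show n - 1 - (p+1) + 1 = n - 1 - p by omega] at h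
        exact h
      rw [harg]
      exact ih (by omega)

theorem pvGray_one (b start : Int) (hb : 1 ≤ b) (i : Int) (h0 : 0 ≤ i) (h1 : i < b) :
    pvGray b start 1 0 i = [start + i] := by
  show (start + _) :: _ = _
  have hfd : PySem.Int.floordiv i (b ^ 0) = i := by
    rw [pow_zero, PySem.Int.floordiv_eq_ediv_of_pos (by omega), Int.ediv_one]
  have hm : PySem.Int.mod i b = i := by
    rw [PySem.Int.mod_eq_emod_of_pos (by omega)]
    exact Int.emod_eq_of_lt h0 h1
  simp [pvGray, hm]


-- a fold whose body ignores the index is an iterate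
theorem pvFoldConst {α ι : Type} (F : α → α) (l : List ι) (a : α) :
    l.foldl (fun s _ => F s) a = F^[l.length] a := by
  induction l generalizing a with
  | nil => rfl
  | cons x xs ih => rw [List.foldl_cons, ih, List.length_cons, Function.iterate_succ_apply]

-- B's digit loop computes pvGray (pw runs b^(k-1), b^(k-2), …)
theorem pvIterB (b start i : Int) (hb : 1 ≤ b) :
    ∀ (k : Nat) (rec : Array Int) (s pw : Int), (k = 0 ∨ pw = b ^ (k - 1)) →
      ((fun st => pvDigitB b start i st 0)^[k] (rec, s, pw)).1.toList
        = rec.toList ++ pvGray b start k s i := by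
  intro k
  induction k with
  | zero => intro rec s pw _; simp [pvGray]
  | succ k ih =>
      intro rec s pw hpw
      have hpw' : pw = b ^ k := by
        rcases hpw with h | h
        · omega
        · simpa using h
      subst hpw'
      rw [Function.iterate_succ_apply]
      have hF : pvDigitB b start i (rec, s, b ^ k) 0
          = (rec.push (start + (if PySem.Int.mod s 2 = 0
                then PySem.Int.mod (PySem.Int.floordiv i (b ^ k)) b
                else b - 1 - PySem.Int.mod (PySem.Int.floordiv i (b ^ k)) b)),
             s + (if PySem.Int.mod s 2 = 0
                then PySem.Int.mod (PySem.Int.floordiv i (b ^ k)) b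
                else b - 1 - PySem.Int.mod (PySem.Int.floordiv i (b ^ k)) b),
             PySem.Int.floordiv (b ^ k) b) := rfl
      rw [hF]
      have hnext : k = 0 ∨ PySem.Int.floordiv (b ^ k) b = b ^ (k - 1) := by
        rcases Nat.eq_zero_or_pos k with h0 | hk
        · exact Or.inl h0
        · right
          rw [show b ^ k = b ^ (k - 1) * b by rw [← pow_succ]; congr 1; omega,
              PySem.Int.floordiv_eq_ediv_of_pos (by omega),
              Int.mul_ediv_cancel _ (by omega)]
      rw [ih _ _ _ hnext, Array.toList_push]
      rw [show pvGray b start (k+1) s i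
            = (start + (if PySem.Int.mod s 2 = 0
                then PySem.Int.mod (PySem.Int.floordiv i (b ^ k)) b
                else b - 1 - PySem.Int.mod (PySem.Int.floordiv i (b ^ k)) b))
              :: pvGray b start k
                  (s + (if PySem.Int.mod s 2 = 0
                    then PySem.Int.mod (PySem.Int.floordiv i (b ^ k)) b
                    else b - 1 - PySem.Int.mod (PySem.Int.floordiv i (b ^ k)) b)) i from rfl]
      rw [List.append_assoc, List.singleton_append]

-- B's output, as pvD (the base > 0 and fields ≥ 1 case)
theorem pvAltVal (fields start end_ : Int) (hb : ¬ end_ - start + 1 ≤ 0) (hf : 1 ≤ fields) :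
    generate_grey_code_alt fields start end_
      = pvD (end_ - start + 1) start fields.toNat fields.toNat := by
  set b := end_ - start + 1 with hbdef
  set n := fields.toNat with hndef
  have hb1 : 1 ≤ b := by omega
  have hBtn : (b ^ n).toNat = b.toNat ^ n := Int.toNat_pow_of_nonneg (by omega) n
  have hBint : ((b.toNat : Nat) : Int) = b := Int.toNat_of_nonneg (by omega)
  unfold generate_grey_code_alt
  rw [if_neg hb]
  rw [pvPushFold (fun i => (((PySem.List.pyRange 0 fields 1).foldl (pvDigitB b start i)
        (#[], 0, b ^ (fields - 1).toNat)).1.toList)), List.nil_append]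
  rw [PySem.List.pyRange_one 0 (b ^ fields.toNat), List.map_map]
  unfold pvD
  rw [show (b ^ fields.toNat - 0).toNat = b.toNat ^ n by rw [← hndef, ← hBtn]; norm_num]
  apply List.map_congr_left
  intro i _
  show ((PySem.List.pyRange 0 fields 1).foldl (pvDigitB b start (0 + (i : Int)))
      ((#[] : Array Int), 0, b ^ (fields - 1).toNat)).1.toList = _
  have hconst : (PySem.List.pyRange 0 fields 1).foldl (pvDigitB b start (0 + (i : Int)))
        ((#[] : Array Int), 0, b ^ (fields - 1).toNat)
      = (PySem.List.pyRange 0 fields 1).foldl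
          (fun st _ => pvDigitB b start (0 + (i : Int)) st 0)
          ((#[] : Array Int), 0, b ^ (fields - 1).toNat) := rfl
  rw [hconst, pvFoldConst, PySem.List.length_pyRange_one]
  rw [show (fields - 0).toNat = n by omega]
  rw [pvIterB b start (0 + (i : Int)) hb1 n _ _ _
      (Or.inr (by rw [show (fields - 1).toNat = n - 1 by omega]))]
  rw [show n - n = 0 by omega]
  simp

-- ===== VERDICT (by name: the statement is the Claim_ definition above) =====
theorem generate_grey_code_spec : Claim_unchanged_generate_grey_code := by
  unfold Claim_unchanged_generate_grey_code
  intro fields start end_ _hdom hpre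
  unfold Spec_generate_grey_code
  intro hnD
  have hA := pvPortA_eq fields start end_
  by_cases hb : end_ - start + 1 ≤ 0
  · -- empty range of values: both sides are []
    have hB : generate_grey_code_alt fields start end_ = [] := by
      unfold generate_grey_code_alt
      rw [if_pos hb]
    have hjr : PySem.List.pyRange start (end_+1) 1 = [] :=
      PySem.List.pyRange_one_eq_nil (by omega)
    have hstep : ∀ d pos, pvStepAL start end_ d pos = d := by
      intro d pos
      unfold pvStepAL
      rw [PySem.List.pyRange_one_eq_nil (by omega), List.foldl_nil, List.append_nil]
    have hfix : ∀ (l : List Int) (d : List (List Int)),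
        l.foldl (pvStepAL start end_) d = d := by
      intro l
      induction l with
      | nil => intro d; rfl
      | cons x xs ih => intro d; rw [List.foldl_cons, hstep]; exact ih d
    rw [hA, hjr, List.map_nil, hfix, hB]
  · -- at least one value; fields = 0 is the D_ region, so 1 ≤ fields here
    have hf : 1 ≤ fields := by
      rcases lt_or_ge fields 1 with hlt | hge
      · exact absurd ⟨by unfold Pre_generate_grey_code at hpre; omega, by omega⟩ hnD
      · exact hge
    have hb1 : 1 ≤ end_ - start + 1 := by omega
    rw [hA]
    set b := end_ - start + 1 with hbdef
    set n := fields.toNat with hndef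
    have hn : ((n : Nat) : Int) = fields := Int.toNat_of_nonneg (by omega)
    have hBint : ((b.toNat : Nat) : Int) = b := Int.toNat_of_nonneg (by omega)
    have hBv : generate_grey_code_alt fields start end_ = pvD b start n n :=
      pvAltVal fields start end_ hb hf
    -- A's initial data array is pvD b start n 1
    have hAinit : (PySem.List.pyRange start (end_ + 1) 1).map
          (fun j => List.replicate (fields.toNat - 1) start ++ [j])
        = pvD b start n 1 := by
      rw [PySem.List.pyRange_one, List.map_map]
      unfold pvD
      rw [show (end_ + 1 - start).toNat = b.toNat ^ 1 by rw [pow_one]; omega]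
      apply List.map_congr_left
      intro i hi
      rw [List.mem_range, pow_one] at hi
      show List.replicate (n - 1) start ++ [start + (i : Int)] = _
      rw [pvGray_one b start hb1 (i : Int) (by omega) (by omega)]
    rw [hAinit, hBv]
    by_cases hf2 : 2 ≤ fields
    · have hpos : PySem.List.pyRange (fields - 2) (-1) (-1)
          = PySem.List.pyRange ((n - 2 : Nat) : Int) (-1) (-1) := by
        rw [show ((n - 2 : Nat) : Int) = fields - 2 by omega]
      rw [hpos]
      have h := pvPositions_fold start end_ hb1 n (n - 2) (by omega)
      rw [show n - 1 - (n - 2) = 1 by omega] at h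
      exact h
    · have hn1 : n = 1 := by omega
      have hpos : PySem.List.pyRange (fields - 2) (-1) (-1) = [] :=
        PySem.List.pyRange_neg_one_eq_nil (by omega)
      rw [hpos, List.foldl_nil, hn1]

theorem generate_grey_code_changed : Claim_changed_generate_grey_code := by
  unfold Claim_changed_generate_grey_code; decide

theorem generate_grey_code_tight : Claim_exact_generate_grey_code := by
  unfold Claim_exact_generate_grey_code
  intro fields start end_ _hdom _hpre hD
  obtain ⟨hf0, hse⟩ : fields = 0 ∧ start ≤ end_ := hD
  subst hf0
  have hAhead : generate_grey_code 0 start end_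
      = [start] :: ((PySem.List.pyRange (start + 1) (end_ + 1) 1).map
          (fun j => List.replicate ((0:Int).toNat - 1) start ++ [j])) := by
    rw [pvPortA_eq, show (0:Int) - 2 = (-2:Int) by ring,
        PySem.List.pyRange_neg_one_eq_nil (by norm_num), List.foldl_nil,
        PySem.List.pyRange_one_cons (by omega), List.map_cons]
    rfl
  have hB : generate_grey_code_alt 0 start end_ = [[]] := by
    unfold generate_grey_code_alt
    rw [if_neg (by omega)]
    simp only [show PySem.List.pyRange 0 (0:Int) 1 = [] from
        PySem.List.pyRange_one_eq_nil le_rfl, List.foldl_nil]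
    rw [show ((0:Int).toNat) = 0 from rfl, pow_zero,
        PySem.List.pyRange_one_cons (by norm_num), show (0:Int) + 1 = 1 by ring,
        PySem.List.pyRange_one_eq_nil (by norm_num), List.foldl_cons, List.foldl_nil]
    rfl
  rw [hAhead, hB]
  intro hcontra
  simp at hcontra
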